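-- pv_equiv track=rewrite | github.com/DizhenLiang/Huffman_Elias_Omege_BWT_Data_Compression | q2_decoder.py | nccourence
-- ===== SOURCE A (Python) =====
-- def nccourence(bwt_string):
--     n_occur = []
--
--     for i in range(len(bwt_string)):
--         match_count = 0
--         for match_char in bwt_string[:i]:
--             if match_char == bwt_string[i]:
--                 match_count+=1
--
--         n_occur.append(match_count)
--     return n_occur
-- ===== SOURCE B (Python) =====
-- def nccourence(bwt_string):
--     counts = {}
--     result = []
--     for c in bwt_string:
--         r = counts.get(c, 0)
--         result.append(r)
--         counts[c] = r + 1
--     return result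
-- ===== Notes on version B (the rewrite author's own statement) =====
-- stated objective: faster
-- what changed: Replaces the quadratic rescan of each prefix with a single pass carrying a running per-character occurrence counter in a dict.
import Mathlib
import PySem

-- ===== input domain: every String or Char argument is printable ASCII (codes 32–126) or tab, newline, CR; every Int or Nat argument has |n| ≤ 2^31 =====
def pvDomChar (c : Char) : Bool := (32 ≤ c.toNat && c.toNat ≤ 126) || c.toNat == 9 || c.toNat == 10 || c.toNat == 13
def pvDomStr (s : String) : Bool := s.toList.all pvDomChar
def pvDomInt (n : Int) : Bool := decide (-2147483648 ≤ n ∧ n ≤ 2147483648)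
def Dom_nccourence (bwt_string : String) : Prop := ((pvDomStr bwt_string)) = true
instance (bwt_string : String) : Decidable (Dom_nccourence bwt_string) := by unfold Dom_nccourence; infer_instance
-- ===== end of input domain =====

-- B replaces A's quadratic prefix rescans with one pass over the string carrying a per-character
-- occurrence counter (dict); same return value, O(n) instead of O(n^2).

-- ===== PORT A =====
def nccourence (bwt_string : String) : List Int :=
  let cs := bwt_string.toList
  (PySem.List.pyRange 0 (cs.length : Int) 1).foldl
    (fun n_occur i =>
      let ci := PySem.List.pyGetD cs i ' '
      let match_count : Int :=
        (PySem.List.slice cs none (some i)).foldl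
          (fun mc match_char => if match_char == ci then mc + 1 else mc) 0
      n_occur ++ [match_count]) []

-- ===== PORT B =====
def nccourence_alt (bwt_string : String) : List Int :=
  (bwt_string.toList.foldl
    (fun (st : PySem.Dict Char Int × List Int) c =>
      let r := st.1.getD c 0
      (st.1.insert c (r + 1), st.2 ++ [r]))
    (PySem.Dict.empty, [])).2

-- ===== PRECONDITION & SPEC =====
def Spec_nccourence (bwt_string : String) (out : List Int) : Prop := out = nccourence_alt bwt_string
instance (bwt_string : String) (out : List Int) : Decidable (Spec_nccourence bwt_string out) := by unfold Spec_nccourence; infer_instance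

-- ===== CLAIM (what is proved, stated in full; the proofs are below) =====
def Claim_equal_nccourence : Prop := ∀ (bwt_string : String), Dom_nccourence bwt_string → Spec_nccourence bwt_string (nccourence bwt_string)

-- ===== LEMMAS AND PROOFS =====

-- A's loop, as a function of the character list
def aStep (cs : List Char) (n_occur : List Int) (i : Int) : List Int :=
  n_occur ++ [((PySem.List.slice cs none (some i)).foldl
    (fun mc match_char => if match_char == PySem.List.pyGetD cs i ' ' then mc + 1 else mc) 0 : Int)]

def aList (cs : List Char) : List Int :=
  (PySem.List.pyRange 0 (cs.length : Int) 1).foldl (aStep cs) []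

def bStep (st : PySem.Dict Char Int × List Int) (c : Char) : PySem.Dict Char Int × List Int :=
  let r := st.1.getD c 0
  (st.1.insert c (r + 1), st.2 ++ [r])

def bList (cs : List Char) : List Int := (cs.foldl bStep (PySem.Dict.empty, [])).2

theorem aList_snoc (cs : List Char) (c : Char) :
    aList (cs ++ [c]) = aList cs ++ [(cs.count c : Int)] := by
  simp only [aList, List.length_append, List.length_cons, List.length_nil]
  push_cast
  rw [PySem.List.pyRange_one_succ_right (by positivity), List.foldl_append]
  simp only [List.foldl_cons, List.foldl_nil]
  have hpref : (PySem.List.pyRange 0 (cs.length : Int) 1).foldl (aStep (cs ++ [c])) [] =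
      (PySem.List.pyRange 0 (cs.length : Int) 1).foldl (aStep cs) [] := by
    apply PySem.List.foldl_congr_mem
    intro acc i hi
    rw [PySem.List.mem_pyRange_one] at hi
    unfold aStep
    rw [PySem.List.pyGetD_of_nonneg, PySem.List.pyGetD_of_nonneg, List.getD_append,
      PySem.List.slice_to _ hi.1, PySem.List.slice_to _ hi.1, List.take_append_of_le_length]
    all_goals omega
  rw [hpref]
  have hc : PySem.List.pyGetD (cs ++ [c]) (cs.length : Int) ' ' = c := by
    rw [PySem.List.pyGetD_natCast]; simp
  have hs : PySem.List.slice (cs ++ [c]) none (some (cs.length : Int)) = cs := by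
    rw [PySem.List.slice_to_natCast]; simp
  unfold aStep
  rw [hc, hs, PySem.List.foldl_beq_add_one, zero_add]

theorem bFst (cs : List Char) (d : PySem.Dict Char Int) (acc : List Int) :
    (cs.foldl bStep (d, acc)).1 = cs.foldl (fun d x => d.insert x (d.getD x 0 + 1)) d := by
  induction cs generalizing d acc with
  | nil => rfl
  | cons x t ih => simp [bStep, ih]

theorem bList_snoc (cs : List Char) (c : Char) :
    bList (cs ++ [c]) = bList cs ++ [(cs.count c : Int)] := by
  have h := bFst cs PySem.Dict.empty []
  simp only [bList, List.foldl_append, List.foldl_cons, List.foldl_nil, bStep]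
  rw [h, PySem.Dict.getD_foldl_insert_add_one, PySem.Dict.getD_empty]
  simp

theorem ab_eq (cs : List Char) : aList cs = bList cs := by
  induction cs using List.reverseRecOn with
  | nil => rfl
  | append_singleton t c ih => rw [aList_snoc, bList_snoc, ih]

-- ===== VERDICT (by name: the statement is the Claim_ definition above) =====
theorem nccourence_spec : Claim_equal_nccourence := by
  intro s _
  show nccourence s = nccourence_alt s
  exact ab_eq s.toList
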